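-- pv_equiv track=rewrite | github.com/ahmed0z/PIM_Tool_ML_Qoder | autopatternchecker/training.py | _generate_signature
-- ===== SOURCE A (Python) =====
-- def _generate_signature(value: str) -> str:
--     """Generate signature for a value."""
--     if not value:
--         return ""
--
--     signature = []
--     current_char = None
--     count = 0
--
--     for char in str(value):
--         if char.isdigit():
--             char_type = 'D'
--         elif char.isalpha():
--             char_type = 'L'
--         elif char.isspace():
--             char_type = '_'
--         else:
--             char_type = 'O'
--
--         if char_type == current_char:
--             count += 1
--         else:
--             if current_char is not None:
--                 if count > 1:
--                     signature.append(f"{current_char}{count}")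
--                 else:
--                     signature.append(current_char)
--             current_char = char_type
--             count = 1
--
--     if current_char is not None:
--         if count > 1:
--             signature.append(f"{current_char}{count}")
--         else:
--             signature.append(current_char)
--
--     return "".join(signature)
-- ===== SOURCE B (Python) =====
-- def _generate_signature(value: str) -> str:
--     """Generate signature for a value."""
--     if not value:
--         return ""
--
--     def code(ch):
--         if ch.isdigit():
--             return 'D'
--         if ch.isalpha():
--             return 'L'
--         if ch.isspace():
--             return '_'
--         return 'O'
--
--     codes = [code(ch) for ch in str(value)]
--     n = len(codes)
--     cuts = [i for i in range(n) if i == 0 or codes[i] != codes[i - 1]]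
--     cuts.append(n)
--     return "".join(
--         codes[a] + (str(b - a) if b - a > 1 else "")
--         for a, b in zip(cuts, cuts[1:])
--     )
-- ===== Notes on version B (the rewrite author's own statement) =====
-- stated objective: alternative
-- what changed: B first maps the string to type codes, then computes the list of run-boundary indices (positions where the code changes) by filtering range(n), and emits each run from index subtraction over adjacent boundaries, instead of A's streaming current-char/count state machine.
import Mathlib
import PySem

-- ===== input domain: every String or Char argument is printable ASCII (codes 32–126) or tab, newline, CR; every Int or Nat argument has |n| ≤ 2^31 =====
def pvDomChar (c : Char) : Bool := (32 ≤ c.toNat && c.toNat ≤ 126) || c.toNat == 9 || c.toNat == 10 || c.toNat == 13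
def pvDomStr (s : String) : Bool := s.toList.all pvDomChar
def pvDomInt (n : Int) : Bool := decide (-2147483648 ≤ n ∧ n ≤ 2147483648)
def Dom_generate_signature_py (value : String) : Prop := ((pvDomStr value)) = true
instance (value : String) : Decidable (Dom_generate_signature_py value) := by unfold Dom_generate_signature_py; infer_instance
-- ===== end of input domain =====

-- B replaces A's streaming current-char/count state machine by staged passes: map to type
-- codes, filter range(n) for the run-boundary indices, and emit runs by index subtraction.

-- ===== PORT A =====
-- classification of one character (the if/elif chain at the top of A's loop body)
def pvClassify (c : Char) : Char :=
  if PySem.Chars.isdigit c then 'D'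
  else if PySem.Chars.isalpha c then 'L'
  else if PySem.Chars.isspace c then '_'
  else 'O'

-- f"{current_char}{count}" vs current_char (A's append step, identical in both places it occurs)
def pvEmitA (c : Char) (count : Int) : List Char :=
  if count > 1 then c :: PySem.Int.toChars count else [c]

-- the for-loop of A: state (current_char, count, signature)
def pvLoopA : List Char → Option Char × Int × List (List Char) → Option Char × Int × List (List Char)
  | [], st => st
  | ch :: rest, (cur, count, sig) =>
    let t := pvClassify ch
    if some t = cur then
      pvLoopA rest (cur, count + 1, sig)
    else
      match cur with
      | none => pvLoopA rest (some t, 1, sig)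
      | some c => pvLoopA rest (some t, 1, sig ++ [pvEmitA c count])

-- A's trailing 'if current_char is not None: append' step
def pvFinish : Option Char × Int × List (List Char) → List (List Char)
  | (none, _, sig) => sig
  | (some c, count, sig) => sig ++ [pvEmitA c count]

def generate_signature_py (value : String) : String :=
  if value.toList = [] then "" else
    String.ofList (PySem.Chars.join [] (pvFinish (pvLoopA value.toList (none, 0, []))))

-- ===== PORT B =====
-- B's boundary filter: [i for i in range(n) if i == 0 or codes[i] != codes[i-1]].
-- codes[i] / codes[i-1] are always in range in the Python (i < n, and i-1 only reached
-- for i >= 1 thanks to 'or' short-circuit), so getD with an arbitrary default is exact.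
def pvCuts (codes : List Char) : List Nat :=
  (List.range codes.length).filter
    (fun i => i == 0 || !(codes.getD i ' ' == codes.getD (i - 1) ' '))

-- one joined piece: codes[a] + (str(b-a) if b-a > 1 else "")
def pvPiece (codes : List Char) (p : Nat × Nat) : List Char :=
  codes.getD p.1 ' ' :: (if p.2 - p.1 > 1 then PySem.Int.toChars ((p.2 : Int) - (p.1 : Int)) else [])

def generate_signature_py_alt (value : String) : String :=
  if value.toList = [] then "" else
    let codes := value.toList.map pvClassify
    let cuts := pvCuts codes ++ [codes.length]
    String.ofList (PySem.Chars.join [] ((cuts.zip cuts.tail).map (pvPiece codes)))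

-- ===== PRECONDITION & SPEC =====
def Spec_generate_signature_py (value : String) (out : String) : Prop := out = generate_signature_py_alt value
instance (value : String) (out : String) : Decidable (Spec_generate_signature_py value out) := by unfold Spec_generate_signature_py; infer_instance

-- ===== CLAIM (what is proved, stated in full; the proofs are below) =====
def Claim_equal_generate_signature_py : Prop := ∀ (value : String), Dom_generate_signature_py value → Spec_generate_signature_py value (generate_signature_py value)

-- ===== LEMMAS AND PROOFS =====

-- the run decomposition both sides are reduced to: (code, run length) runs in order
def pvRuns : List Char → List (Char × Nat)
  | [] => []
  | c :: rest =>
    (c, (rest.takeWhile (· == c)).length + 1) :: pvRuns (rest.dropWhile (· == c))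
termination_by l => l.length
decreasing_by
  simpa using Nat.lt_succ_of_le (rest.length_dropWhile_le (· == c))

def pvEmitB (p : Char × Nat) : List Char :=
  if p.2 > 1 then p.1 :: PySem.Int.toChars (p.2 : Int) else [p.1]

-- run-length emitter on a code list, seeded with an open run (c, k): A's loop shape
def pvGrun : Char → Int → List Char → List (List Char)
  | c, k, [] => [pvEmitA c k]
  | c, k, x :: l => if x = c then pvGrun c (k + 1) l else pvEmitA c k :: pvGrun x 1 l

theorem pvLoopA_grun (l : List Char) : ∀ (c : Char) (k : Int) (sig : List (List Char)),
    pvFinish (pvLoopA l (some c, k, sig)) = sig ++ pvGrun c k (l.map pvClassify) := by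
  induction l with
  | nil => intro c k sig; simp [pvLoopA, pvFinish, pvGrun]
  | cons x l ih =>
    intro c k sig
    simp only [pvLoopA, List.map_cons, pvGrun]
    by_cases h : pvClassify x = c
    · simp [h, ih]
    · simp [h, ih, List.append_assoc]

theorem pvEmitA_eq_emitB (c : Char) (k : Nat) : pvEmitA c (k : Int) = pvEmitB (c, k) := by
  simp only [pvEmitA, pvEmitB]
  by_cases h : k > 1
  · rw [if_pos (by exact_mod_cast h), if_pos h]
  · rw [if_neg (by exact_mod_cast h), if_neg h]

theorem pvGrun_runs (l : List Char) : ∀ (c : Char) (k : Nat),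
    pvGrun c ((k : Int) + 1) l
      = pvEmitB (c, k + 1 + (l.takeWhile (· == c)).length)
        :: (pvRuns (l.dropWhile (· == c))).map pvEmitB := by
  induction l with
  | nil =>
    intro c k
    rw [show ((k : Int) + 1) = ((k + 1 : Nat) : Int) by push_cast; ring]
    simp only [pvGrun, List.takeWhile_nil, List.dropWhile_nil, List.length_nil, Nat.add_zero,
      pvRuns, List.map_nil, pvEmitA_eq_emitB]
  | cons x l ih =>
    intro c k
    simp only [pvGrun]
    by_cases h : x = c
    · rw [if_pos h, show ((k : Int) + 1 + 1) = ((k + 1 : Nat) : Int) + 1 by push_cast; ring,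
        ih c (k + 1), List.takeWhile_cons_of_pos (by simp [h]),
        List.dropWhile_cons_of_pos (by simp [h]), List.length_cons,
        show k + 1 + 1 + (l.takeWhile (· == c)).length = k + 1 + ((l.takeWhile (· == c)).length + 1) by omega]
    · have ih1 := ih x 0
      rw [Nat.cast_zero, zero_add] at ih1
      rw [if_neg h, show ((k : Int) + 1) = ((k + 1 : Nat) : Int) by push_cast; ring,
        pvEmitA_eq_emitB, ih1, List.takeWhile_cons_of_neg (by simp [h]),
        List.dropWhile_cons_of_neg (by simp [h]), List.length_nil, Nat.add_zero]
      show _ = pvEmitB (c, k + 1) :: (pvRuns (x :: l)).map pvEmitB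
      rw [pvRuns, List.map_cons,
        show (l.takeWhile (· == x)).length + 1 = 0 + 1 + (l.takeWhile (· == x)).length by omega]

-- B's pieces, as computed by the port, for a code list l
def pvPieces (l : List Char) : List (List Char) :=
  ((pvCuts l ++ [l.length]).zip (pvCuts l ++ [l.length]).tail).map (pvPiece l)

-- every index below the first run's length reads the first run's code
theorem pvGetD_first_run (c : Char) (rest : List Char) (i : Nat)
    (hi : i < (rest.takeWhile (· == c)).length + 1) :
    (c :: rest).getD i ' ' = c := by
  cases i with
  | zero => rfl
  | succ j =>
    have hj : j < (rest.takeWhile (· == c)).length := by omega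
    obtain ⟨s, hs⟩ := List.takeWhile_prefix (l := rest) (p := (· == c))
    have hget : rest[j]? = some ((rest.takeWhile (· == c))[j]) := by
      conv_lhs => rw [← hs]
      rw [List.getElem?_append_left hj, List.getElem?_eq_getElem hj]
    have hc := List.mem_takeWhile_imp (List.getElem_mem hj)
    rw [List.getD_cons_succ, List.getD_eq_getElem?_getD, hget, Option.getD_some]
    simpa using hc

-- reading past the first run reads the dropped suffix (unconditionally: both default)
theorem pvGetD_shift (c : Char) (rest : List Char) (j : Nat) :
    (c :: rest).getD ((rest.takeWhile (· == c)).length + 1 + j) ' '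
      = (rest.dropWhile (· == c)).getD j ' ' := by
  conv_lhs => rw [show c :: rest = (c :: rest.takeWhile (· == c)) ++ rest.dropWhile (· == c) by
    simp [List.takeWhile_append_dropWhile]]
  rw [List.getD_eq_getElem?_getD, List.getD_eq_getElem?_getD,
    List.getElem?_append_right (by simp only [List.length_cons]; omega)]
  simp only [List.length_cons]
  rw [show (rest.takeWhile (· == c)).length + 1 + j - ((rest.takeWhile (· == c)).length + 1) = j by omega]

-- the head of a dropWhile tail fails the predicate
theorem pvHeadDropFalse (p : Char → Bool) (l s : List Char) (x : Char)
    (h : l.dropWhile p = x :: s) : p x = false := by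
  have hne : l.dropWhile p ≠ [] := by simp [h]
  have h2 := List.head_dropWhile_not p (l := l) hne
  have h4 : (l.dropWhile p).head? = some x := by rw [h]; rfl
  rw [List.head?_eq_some_head hne] at h4
  rw [Option.some_inj.mp h4] at h2
  exact h2

-- the boundary filter of a nonempty code list: 0, then the next list's boundaries shifted
theorem pvCuts_cons (c : Char) (rest : List Char) :
    pvCuts (c :: rest)
      = 0 :: (pvCuts (rest.dropWhile (· == c))).map
          (fun x => ((rest.takeWhile (· == c)).length + 1) + x) := by
  unfold pvCuts
  have hlen : (c :: rest).length
      = ((rest.takeWhile (· == c)).length + 1) + (rest.dropWhile (· == c)).length := by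
    have := congrArg List.length (List.takeWhile_append_dropWhile (p := (· == c)) (l := rest))
    simp only [List.length_append] at this
    simp only [List.length_cons]
    omega
  set k := (rest.takeWhile (· == c)).length + 1 with hk
  set s := rest.dropWhile (· == c) with hs
  rw [hlen, List.range_add, List.filter_append]
  have h1 : (List.range k).filter
      (fun i => i == 0 || !((c :: rest).getD i ' ' == (c :: rest).getD (i - 1) ' ')) = [0] := by
    rw [hk, List.range_succ_eq_map, List.filter_cons_of_pos (by simp), List.filter_map]
    have : List.filter ((fun i => i == 0 || !((c :: rest).getD i ' ' == (c :: rest).getD (i - 1) ' ')) ∘ Nat.succ)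
        (List.range (rest.takeWhile (· == c)).length) = [] := by
      rw [List.filter_eq_nil_iff]
      intro a ha
      rw [List.mem_range] at ha
      simp only [Function.comp]
      rw [pvGetD_first_run c rest (a + 1) (by omega),
        show a + 1 - 1 = a by omega, pvGetD_first_run c rest a (by omega)]
      simp
    rw [this]; rfl
  rw [h1]
  have h2 : ∀ j ∈ List.range s.length,
      (((fun i => i == 0 || !((c :: rest).getD i ' ' == (c :: rest).getD (i - 1) ' ')) ∘ fun x => k + x) j)
        = ((fun i => i == 0 || !(s.getD i ' ' == s.getD (i - 1) ' ')) j) := by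
    intro j hj
    simp only [Function.comp_apply]
    rw [List.mem_range] at hj
    cases j with
    | zero =>
      obtain ⟨x, s', hxs⟩ : ∃ x s', s = x :: s' := by
        cases hcs : s with
        | nil => rw [hcs] at hj; simp at hj
        | cons x s' => exact ⟨x, s', rfl⟩
      have hx : (x == c) = false :=
        pvHeadDropFalse (· == c) rest s' x (by rw [← hs, hxs])
      have hk0 : (c :: rest).getD (k + 0) ' ' = s.getD 0 ' ' := by
        rw [Nat.add_zero, hk, hs, show (rest.takeWhile (· == c)).length + 1
          = (rest.takeWhile (· == c)).length + 1 + 0 by omega, pvGetD_shift]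
      simp only [hk0, hxs, List.getD_cons_zero]
      rw [show k + 0 - 1 = (rest.takeWhile (· == c)).length by omega,
        pvGetD_first_run c rest _ (by omega)]
      simp [hx, hk]
    | succ j' =>
      have ha : (c :: rest).getD (k + (j' + 1)) ' ' = s.getD (j' + 1) ' ' := by
        rw [hk, hs, pvGetD_shift]
      have hb : (c :: rest).getD (k + (j' + 1) - 1) ' ' = s.getD j' ' ' := by
        rw [show k + (j' + 1) - 1 = (rest.takeWhile (· == c)).length + 1 + j' by omega,
          hs, pvGetD_shift]
      simp only [ha, hb]
      rw [show j' + 1 - 1 = j' by omega]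
      simp [hk]
  rw [List.filter_map, List.filter_congr h2]
  rfl

-- pvPiece after shifting both cut indices by k reads the dropped suffix
theorem pvPiece_shift (c : Char) (rest : List Char) (p : Nat × Nat) :
    pvPiece (c :: rest)
        (((rest.takeWhile (· == c)).length + 1) + p.1,
         ((rest.takeWhile (· == c)).length + 1) + p.2)
      = pvPiece (rest.dropWhile (· == c)) p := by
  obtain ⟨a, b⟩ := p
  unfold pvPiece
  simp only
  rw [show (rest.takeWhile (· == c)).length + 1 + a
      = (rest.takeWhile (· == c)).length + 1 + a by rfl, pvGetD_shift,
    show (rest.takeWhile (· == c)).length + 1 + b - ((rest.takeWhile (· == c)).length + 1 + a)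
      = b - a by omega,
    show (((rest.takeWhile (· == c)).length + 1 + b : Nat) : Int)
        - (((rest.takeWhile (· == c)).length + 1 + a : Nat) : Int)
      = ((b : Nat) : Int) - ((a : Nat) : Int) by push_cast; ring]

-- the head pair (0, k) emits the first run
theorem pvPiece_head (c : Char) (rest : List Char) (k : Nat) :
    pvPiece (c :: rest) (0, k) = pvEmitB (c, k) := by
  unfold pvPiece pvEmitB
  simp only [List.getD_cons_zero, Nat.sub_zero, Nat.cast_zero, sub_zero]
  by_cases h : k > 1 <;> simp [h]

-- B's pieces are the emitted runs
theorem pvPieces_runs_aux : ∀ (n : Nat) (l : List Char), l.length ≤ n →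
    pvPieces l = (pvRuns l).map pvEmitB := by
  intro n
  induction n with
  | zero =>
    intro l hl
    have hnil : l = [] := List.length_eq_zero_iff.mp (by omega)
    subst hnil
    simp [pvPieces, pvCuts, pvRuns]
  | succ n ih =>
    intro l hl
    cases l with
    | nil => simp [pvPieces, pvCuts, pvRuns]
    | cons c rest =>
      set k := (rest.takeWhile (· == c)).length + 1 with hk
      set s := rest.dropWhile (· == c) with hs
      have hslen : s.length ≤ n := by
        rw [hs]
        have h := rest.length_dropWhile_le (· == c)
        simp only [List.length_cons] at hl
        omega
      have hlen : (c :: rest).length = k + s.length := by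
        have := congrArg List.length (List.takeWhile_append_dropWhile (p := (· == c)) (l := rest))
        simp only [List.length_append] at this
        simp only [List.length_cons, hk, hs]
        omega
      obtain ⟨cs0, hcuts⟩ : ∃ cs0, pvCuts s ++ [s.length] = 0 :: cs0 := by
        cases hcs : s with
        | nil => exact ⟨[], by simp [pvCuts]⟩
        | cons x s' =>
          refine ⟨(pvCuts (s'.dropWhile (· == x))).map
            (fun y => ((s'.takeWhile (· == x)).length + 1) + y) ++ [s.length], ?_⟩
          rw [hcs, pvCuts_cons]; simp
      unfold pvPieces
      rw [pvCuts_cons c rest, ← hk, ← hs, hlen,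
        show (0 :: (pvCuts s).map (fun x => k + x)) ++ [k + s.length]
          = 0 :: ((pvCuts s ++ [s.length]).map (fun x => k + x)) by simp,
        hcuts]
      simp only [List.map_cons, List.tail_cons, List.zip_cons_cons, List.map_cons]
      rw [Nat.add_zero, pvPiece_head,
        show (List.map (fun x => k + x) cs0 : List Nat)
          = List.map (fun x => k + x) cs0 by rfl]
      have hz : ((k + 0) :: List.map (fun x => k + x) cs0).zip (List.map (fun x => k + x) cs0)
          = ((0 :: cs0).zip cs0).map (Prod.map (fun x => k + x) (fun x => k + x)) := by
        rw [show ((k + 0) :: List.map (fun x => k + x) cs0)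
            = List.map (fun x => k + x) (0 :: cs0) by simp, List.zip_map]
      rw [show (k :: List.map (fun x => k + x) cs0) = ((k + 0) :: List.map (fun x => k + x) cs0) by simp,
        hz, List.map_map]
      have hcomp : (pvPiece (c :: rest)) ∘ (Prod.map (fun x => k + x) (fun x => k + x))
          = pvPiece s := by
        funext p
        simp only [Function.comp, Prod.map]
        rw [hk, hs] at *
        exact pvPiece_shift c rest p
      rw [hcomp, show pvRuns (c :: rest) = (c, k) :: pvRuns s by rw [pvRuns],
        List.map_cons]
      congr 1
      rw [show List.map (pvPiece s) ((0 :: cs0).zip cs0) = pvPieces s by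
        unfold pvPieces; rw [hcuts]; rfl]
      exact ih s hslen

theorem pvPieces_runs (l : List Char) : pvPieces l = (pvRuns l).map pvEmitB :=
  pvPieces_runs_aux l.length l (le_refl _)

-- ===== VERDICT (by name: the statement is the Claim_ definition above) =====
theorem generate_signature_py_spec : Claim_equal_generate_signature_py := by
  intro value _
  unfold Spec_generate_signature_py generate_signature_py generate_signature_py_alt
  cases hl : value.toList with
  | nil => rfl
  | cons c0 rest =>
    rw [if_neg (by simp), if_neg (by simp)]
    have hA : pvFinish (pvLoopA (c0 :: rest) (none, 0, []))
        = pvGrun (pvClassify c0) 1 (rest.map pvClassify) := by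
      have hstep : pvLoopA (c0 :: rest) (none, 0, []) = pvLoopA rest (some (pvClassify c0), 1, []) := by
        simp [pvLoopA]
      rw [hstep, pvLoopA_grun, List.nil_append]
    have hB : pvPieces ((c0 :: rest).map pvClassify)
        = pvGrun (pvClassify c0) 1 (rest.map pvClassify) := by
      rw [pvPieces_runs]
      have h := pvGrun_runs (rest.map pvClassify) (pvClassify c0) 0
      rw [Nat.cast_zero, zero_add] at h
      rw [h, List.map_cons, pvRuns, List.map_cons,
        show ((rest.map pvClassify).takeWhile (· == pvClassify c0)).length + 1
          = 0 + 1 + ((rest.map pvClassify).takeWhile (· == pvClassify c0)).length by omega]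
    rw [hA, ← hB]
    rfl
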